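-- pv_equiv track=rewrite | github.com/wickstjo/aalto-ensure | extraction/no_threads_snapshot.py | segment_timestamps
-- ===== SOURCE A (Python) =====
-- import time, math
--
-- def segment_timestamps(unix_start, unix_end, batch_size=1800):
--
--     container = []
--     time_delta = unix_end - unix_start
--
--     for _ in range(math.floor(time_delta / batch_size)):
--         container.append(batch_size)
--         time_delta -= batch_size
--
--     if time_delta > 0:
--         container.append(time_delta)
--
--     last_start = unix_start
--     tuples = []
--
--     for window in container:
--         tuples.append((last_start, last_start+window))
--         last_start += window
--
--     return tuples
-- ===== SOURCE B (Python) =====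
-- def segment_timestamps(unix_start, unix_end, batch_size=1800):
--     # single fused pass: emit each window while at least one full batch remains
--     tuples = []
--     cur = unix_start
--     while (unix_end - cur) // batch_size >= 1:
--         tuples.append((cur, cur + batch_size))
--         cur += batch_size
--     if unix_end - cur > 0:
--         tuples.append((cur, unix_end))
--     return tuples
-- ===== Notes on version B (the rewrite author's own statement) =====
-- stated objective: simpler
-- what changed: B replaces A's two-phase structure (build a list of window sizes, then map it to tuples with a running start) by one fused while-loop that emits each (cur, cur+batch_size) tuple directly while a full batch remains, then appends the remainder tuple.
import Mathlib
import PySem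

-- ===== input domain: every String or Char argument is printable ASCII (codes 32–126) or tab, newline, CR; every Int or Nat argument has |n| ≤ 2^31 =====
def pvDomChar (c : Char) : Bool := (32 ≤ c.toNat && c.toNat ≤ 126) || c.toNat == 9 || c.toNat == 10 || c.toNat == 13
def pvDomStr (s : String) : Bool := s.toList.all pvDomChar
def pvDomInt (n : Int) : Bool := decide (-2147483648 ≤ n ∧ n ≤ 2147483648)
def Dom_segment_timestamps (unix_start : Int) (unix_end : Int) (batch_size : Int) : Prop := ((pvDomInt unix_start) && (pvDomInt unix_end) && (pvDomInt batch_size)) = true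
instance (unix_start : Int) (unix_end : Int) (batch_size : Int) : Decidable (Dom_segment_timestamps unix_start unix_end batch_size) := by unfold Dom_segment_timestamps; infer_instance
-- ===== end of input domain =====

-- B fuses A's two loops (size list, then tuple map) into one direct while-loop; objective: simpler.

-- ===== PORT A =====
-- math.floor(time_delta / batch_size): on Dom integers this float-division floor
-- equals Python's integer // (the quotient magnitudes are far below 2^53, so the
-- float floor cannot cross an integer boundary); ported as PySem.Int.floordiv.
def segment_timestamps (unix_start : Int) (unix_end : Int) (batch_size : Int) : List (Int × Int) :=
  let td := unix_end - unix_start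
  let p := (PySem.List.pyRange 0 (PySem.Int.floordiv td batch_size) 1).foldl
      (fun (acc : List Int × Int) _ => (acc.1 ++ [batch_size], acc.2 - batch_size)) ([], td)
  let container := if p.2 > 0 then p.1 ++ [p.2] else p.1
  (container.foldl
      (fun (acc : List (Int × Int) × Int) w => (acc.1 ++ [(acc.2, acc.2 + w)], acc.2 + w))
      ([], unix_start)).1

-- ===== PORT B =====
-- the while-loop of Source B: cur runs from unix_start; emit (cur, cur+batch_size) while
-- (unix_end - cur) // batch_size >= 1, then the remainder tuple if anything is left
def segment_timestamps_altGo (unix_end : Int) (batch_size : Int) (cur : Int) : List (Int × Int) :=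
  if h : 1 ≤ PySem.Int.floordiv (unix_end - cur) batch_size then
    (cur, cur + batch_size) :: segment_timestamps_altGo unix_end batch_size (cur + batch_size)
  else if 0 < unix_end - cur then [(cur, unix_end)] else []
termination_by (PySem.Int.floordiv (unix_end - cur) batch_size).toNat
decreasing_by
  simp only [PySem.Int.floordiv] at *
  have hbs : batch_size ≠ 0 := by
    rintro rfl; rw [Int.fdiv_zero] at h; omega
  have hstep : Int.fdiv (unix_end - (cur + batch_size)) batch_size
      = Int.fdiv (unix_end - cur) batch_size - 1 := by
    have h2 := Int.add_mul_fdiv_right (unix_end - cur) (-1) hbs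
    have : unix_end - cur + -1 * batch_size = unix_end - (cur + batch_size) := by ring
    rw [this] at h2; omega
  omega

def segment_timestamps_alt (unix_start : Int) (unix_end : Int) (batch_size : Int) : List (Int × Int) :=
  segment_timestamps_altGo unix_end batch_size unix_start

-- ===== PRECONDITION & SPEC =====
-- Pre_ excludes only batch_size = 0, on which Python A raises ZeroDivisionError.
def Pre_segment_timestamps (unix_start : Int) (unix_end : Int) (batch_size : Int) : Prop := batch_size ≠ 0
instance (unix_start : Int) (unix_end : Int) (batch_size : Int) : Decidable (Pre_segment_timestamps unix_start unix_end batch_size) := by unfold Pre_segment_timestamps; infer_instance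

def pvWitness_segment_timestamps : Int × Int × Int := (0, 10, 3)

def Spec_segment_timestamps (unix_start : Int) (unix_end : Int) (batch_size : Int) (out : List (Int × Int)) : Prop := out = segment_timestamps_alt unix_start unix_end batch_size
instance (unix_start : Int) (unix_end : Int) (batch_size : Int) (out : List (Int × Int)) : Decidable (Spec_segment_timestamps unix_start unix_end batch_size out) := by unfold Spec_segment_timestamps; infer_instance

-- ===== CLAIM (what is proved, stated in full; the proofs are below) =====
def Claim_equal_segment_timestamps : Prop := ∀ (unix_start : Int) (unix_end : Int) (batch_size : Int), Dom_segment_timestamps unix_start unix_end batch_size → Pre_segment_timestamps unix_start unix_end batch_size → Spec_segment_timestamps unix_start unix_end batch_size (segment_timestamps unix_start unix_end batch_size)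

-- ===== LEMMAS AND PROOFS =====

theorem fdiv_sub_self (x bs : Int) (hbs : bs ≠ 0) :
    Int.fdiv (x - bs) bs = Int.fdiv x bs - 1 := by
  have h2 := Int.add_mul_fdiv_right x (-1) hbs
  have : x + -1 * bs = x - bs := by ring
  rw [this] at h2; omega

-- A's first loop builds (replicate k bs, td - k*bs) where k is the range length
theorem sizesFold (bs : Int) :
    ∀ (l : List Int) (c : List Int) (td : Int),
      l.foldl (fun (acc : List Int × Int) _ => (acc.1 ++ [bs], acc.2 - bs)) (c, td)
        = (c ++ List.replicate l.length bs, td - (l.length : Int) * bs) := by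
  intro l
  induction l with
  | nil => intro c td; simp
  | cons x xs ih =>
      intro c td
      simp only [List.foldl_cons, ih, List.length_cons, Prod.mk.injEq]
      constructor
      · simp [List.replicate_succ, List.append_assoc]
      · push_cast; ring

-- A's second loop: the accumulator splits off
theorem tupFold :
    ∀ (cont : List Int) (acc : List (Int × Int)) (last : Int),
      cont.foldl
          (fun (a : List (Int × Int) × Int) w => (a.1 ++ [(a.2, a.2 + w)], a.2 + w)) (acc, last)
        = (acc ++ (cont.foldl
            (fun (a : List (Int × Int) × Int) w => (a.1 ++ [(a.2, a.2 + w)], a.2 + w)) ([], last)).1,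
           (cont.foldl
            (fun (a : List (Int × Int) × Int) w => (a.1 ++ [(a.2, a.2 + w)], a.2 + w)) ([], last)).2) := by
  intro cont
  induction cont with
  | nil => intro acc last; simp
  | cons w ws ih =>
      intro acc last
      simp only [List.foldl_cons, List.nil_append]
      rw [ih (acc ++ [(last, last + w)]) (last + w), ih [(last, last + w)] (last + w)]
      simp [List.append_assoc]

-- closed form of A's container
def containerOf (bs td : Int) : List Int :=
  let n := (Int.fdiv td bs).toNat
  if td - (n : Int) * bs > 0 then List.replicate n bs ++ [td - (n : Int) * bs]
  else List.replicate n bs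

def tupOf (cont : List Int) (last : Int) : List (Int × Int) :=
  (cont.foldl
    (fun (a : List (Int × Int) × Int) w => (a.1 ++ [(a.2, a.2 + w)], a.2 + w)) ([], last)).1

theorem A_char (s e bs : Int) :
    segment_timestamps s e bs = tupOf (containerOf bs (e - s)) s := by
  simp only [segment_timestamps, tupOf, containerOf, PySem.Int.floordiv]
  rw [sizesFold bs (PySem.List.pyRange 0 (Int.fdiv (e - s) bs) 1) [] (e - s)]
  simp [PySem.List.length_pyRange_one]

theorem key (bs : Int) (hbs : bs ≠ 0) :
    ∀ (n : Nat) (s e : Int), (Int.fdiv (e - s) bs).toNat = n →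
      tupOf (containerOf bs (e - s)) s = segment_timestamps_altGo e bs s := by
  intro n
  induction n with
  | zero =>
      intro s e hn
      have hle : Int.fdiv (e - s) bs ≤ 0 := by omega
      rw [segment_timestamps_altGo]
      simp only [PySem.Int.floordiv]
      rw [dif_neg (by omega)]
      simp only [containerOf, hn]
      by_cases hpos : 0 < e - s
      · rw [if_pos (show e - s - ((0 : Nat) : Int) * bs > 0 by push_cast; omega), if_pos hpos]
        simp only [List.replicate, List.nil_append, tupOf, List.foldl_cons, List.foldl_nil]
        norm_num
      · rw [if_neg (by push_cast; omega), if_neg hpos]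
        simp [tupOf]
  | succ n ih =>
      intro s e hn
      have hge : 1 ≤ Int.fdiv (e - s) bs := by omega
      have hshift : Int.fdiv (e - (s + bs)) bs = Int.fdiv (e - s) bs - 1 := by
        have h4 := fdiv_sub_self (e - s) bs hbs
        rw [show e - s - bs = e - (s + bs) by ring] at h4
        exact h4
      have hn' : (Int.fdiv (e - (s + bs)) bs).toNat = n := by omega
      rw [segment_timestamps_altGo]
      simp only [PySem.Int.floordiv]
      rw [dif_pos hge, ← ih (s + bs) e hn']
      -- container at s is bs :: container at (s+bs)
      have hcont : containerOf bs (e - s) = bs :: containerOf bs (e - (s + bs)) := by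
        simp only [containerOf, hn, hn']
        have hr : e - s - ((n : Int) + 1) * bs = e - (s + bs) - (n : Int) * bs := by ring
        push_cast
        rw [hr]
        by_cases h : e - (s + bs) - (n : Int) * bs > 0
        · rw [if_pos h, if_pos h]
          simp [List.replicate_succ]
        · rw [if_neg h, if_neg h]
          simp [List.replicate_succ]
      rw [hcont]
      simp only [tupOf, List.foldl_cons, List.nil_append]
      rw [tupFold _ [(s, s + bs)] (s + bs)]
      rfl

-- ===== VERDICT (by name: the statement is the Claim_ definition above) =====
theorem segment_timestamps_spec : Claim_equal_segment_timestamps := by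
  intro s e bs _ hpre
  unfold Spec_segment_timestamps segment_timestamps_alt
  rw [A_char]
  exact key bs hpre _ s e rfl
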